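-- pv_equiv track=rewrite | github.com/tristanang/comp211 | happyprimes.py | happyprimelist
-- ===== SOURCE A (Python) =====
-- def happyprimelist(n):
--     lst=[]
--     i=2
--     while i<n:
--         if isprime(i) and ishappy(i):
--             lst.append(i)
--         i=i+1
--     return lst
--
-- def isprime(x):
--     from math import sqrt
--     for j in range(2,int(sqrt(x)+1)):
--         if x % j == 0:
--             return False
--     return True
--
-- def ishappy(x):
--     memo=[]
--     def ishappyhelper(x):
--
--         if x == 1:
--             return True
--         elif x in memo:
--             return False
--         else:
--             memo.append(x)
--             return ishappyhelper(sumofsquareofdigits(x))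
--     return ishappyhelper(x)
--
-- def sumofsquareofdigits(n):
--     if n == 0:
--         return 0
--     return (n%10)**2 + sumofsquareofdigits(n//10)
-- ===== SOURCE B (Python) =====
-- def happyprimelist(n):
--     # Sieve of Eratosthenes over [2, n) instead of per-number trial division.
--     comp = [False] * (n if n > 0 else 0)
--     p = 2
--     while p * p < n:
--         if not comp[p]:
--             for m in range(p * p, n, p):
--                 comp[m] = True
--         p += 1
--     out = []
--     for i in range(2, n):
--         if not comp[i] and _ishappy(i):
--             out.append(i)
--     return out
--
-- def _ishappy(x):
--     seen = set()
--     while x != 1: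
--         if x in seen:
--             return False
--         seen.add(x)
--         s = 0
--         while x != 0:
--             s += (x % 10) ** 2
--             x //= 10
--         x = s
--     return True
-- ===== Notes on version B (the rewrite author's own statement) =====
-- stated objective: faster
-- what changed: B finds the primes below n with a single Sieve of Eratosthenes (a set of composites built by striking out multiples) instead of A's per-number trial division, and tests happiness with an iterative seen-set loop and an iterative digit loop instead of A's recursive memo-list helper and recursive digit sum.
import Mathlib
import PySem

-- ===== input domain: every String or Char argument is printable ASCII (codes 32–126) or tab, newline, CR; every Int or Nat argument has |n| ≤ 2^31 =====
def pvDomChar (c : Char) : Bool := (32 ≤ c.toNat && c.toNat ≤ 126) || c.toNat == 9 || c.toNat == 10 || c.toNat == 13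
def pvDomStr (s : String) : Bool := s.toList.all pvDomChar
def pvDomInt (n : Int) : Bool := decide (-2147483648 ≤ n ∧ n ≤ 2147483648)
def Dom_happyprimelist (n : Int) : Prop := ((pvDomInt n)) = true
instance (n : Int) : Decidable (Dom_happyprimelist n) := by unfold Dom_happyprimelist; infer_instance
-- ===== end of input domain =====

-- B replaces A's per-number trial division with a Sieve of Eratosthenes over [2, n) and the
-- recursive memo-list happy test with an iterative seen-set loop (objective: faster).

-- ===== PORT A =====

-- sumofsquareofdigits; the 'n < 0' branch is a totality guard only (Python recurses forever
-- on negative input; the function is never called with a negative argument here).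
def pvSsd (n : Int) : Int :=
  if n = 0 then 0
  else if n < 0 then 0
  else (PySem.Int.mod n 10) ^ 2 + pvSsd (PySem.Int.floordiv n 10)
termination_by n.toNat
decreasing_by
  simp only [PySem.Int.floordiv]
  rw [Int.fdiv_eq_ediv]
  omega

-- isprime; 'int(sqrt(x)+1)' is ported as 'Int.sqrt x + 1': exact for 0 ≤ x ≤ 2^31 + 1, where
-- the correctly rounded float sqrt(x) plus 1, truncated, equals isqrt(x) + 1; the for-loop with
-- early 'return False' is the List.all over the same range.
def pvIsprimeA (x : Int) : Bool :=
  (PySem.List.pyRange 2 (Int.sqrt x + 1) 1).all (fun j => !(PySem.Int.mod x j == 0))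

-- ishappyhelper; fuel 1000 is a totality guard that is exact on every call reached from
-- happyprimelist on Dom: after one step the value is at most 810 (ten digits, each square ≤ 81),
-- so at most 812 distinct values occur before the memo test fires and fuel 1000 is never exhausted.
def pvIshappyHelperA (fuel : Nat) (memo : List Int) (x : Int) : Bool :=
  match fuel with
  | 0 => false
  | f + 1 =>
    if x = 1 then true
    else if x ∈ memo then false
    else pvIshappyHelperA f (memo ++ [x]) (pvSsd x)

def pvIshappyA (x : Int) : Bool := pvIshappyHelperA 1000 [] x

-- the 'while i < n' loop of happyprimelist
def pvHappyLoopA (n i : Int) (lst : List Int) : List Int :=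
  if _h : i < n then
    pvHappyLoopA n (i + 1) (if pvIsprimeA i && pvIshappyA i then lst ++ [i] else lst)
  else lst
termination_by (n - i).toNat
decreasing_by omega

def happyprimelist (n : Int) : List Int := pvHappyLoopA n 2 []

-- ===== PORT B =====

-- inner digit loop of _ishappy ('while x != 0'); the 'x < 0' branch is a totality guard only
-- (the Python loop does not terminate on negative x; it is never reached with a negative value).
def pvSsdIterB (s x : Int) : Int :=
  if x = 0 then s
  else if x < 0 then s
  else pvSsdIterB (s + (PySem.Int.mod x 10) ^ 2) (PySem.Int.floordiv x 10)
termination_by x.toNat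
decreasing_by
  simp only [PySem.Int.floordiv]
  rw [Int.fdiv_eq_ediv]
  omega

-- outer loop of _ishappy ('while x != 1'); fuel 1000 is the same totality guard as in port A,
-- never exhausted on the calls reached from happyprimelist_alt on Dom.
def pvIshappyLoopB (fuel : Nat) (seen : PySem.Set Int) (x : Int) : Bool :=
  match fuel with
  | 0 => false
  | f + 1 =>
    if x = 1 then true
    else if PySem.Set.contains seen x then false
    else pvIshappyLoopB f (PySem.Set.add seen x) (pvSsdIterB 0 x)

def pvIshappyB (x : Int) : Bool := pvIshappyLoopB 1000 PySem.Set.empty x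

-- the sieve loop 'while p * p < n'; 'comp[p]' is read with Array.getD (default false) and
-- 'comp[m] = True' written with Array.setIfInBounds: exact, because every index used satisfies
-- 0 <= p, m < n = len(comp), so no default is ever read and no write is ever dropped.
def pvSieveLoopB (n p : Int) (comp : Array Bool) : Array Bool :=
  if _h : p * p < n then
    pvSieveLoopB n (p + 1)
      (if !(comp.getD p.toNat false) then
        (PySem.List.pyRange (p * p) n p).foldl (fun a m => a.setIfInBounds m.toNat true) comp
       else comp)
  else comp
termination_by (n - p).toNat
decreasing_by
  rcases le_or_gt p 0 with hp | hp
  · have : 0 ≤ p * p := mul_self_nonneg p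
    omega
  · have : p * 1 ≤ p * p := by
      apply mul_le_mul_of_nonneg_left _ (le_of_lt hp)
      omega
    omega

-- '[False] * (n if n > 0 else 0)' is Array.replicate n.toNat false
def happyprimelist_alt (n : Int) : List Int :=
  let comp := pvSieveLoopB n 2 (Array.replicate n.toNat false)
  (PySem.List.pyRange 2 n 1).foldl
    (fun out i => if !(comp.getD i.toNat false) && pvIshappyB i then out ++ [i] else out) []

-- ===== PRECONDITION & SPEC =====
def Spec_happyprimelist (n : Int) (out : List Int) : Prop := out = happyprimelist_alt n
instance (n : Int) (out : List Int) : Decidable (Spec_happyprimelist n out) := by unfold Spec_happyprimelist; infer_instance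

-- ===== CLAIM (what is proved, stated in full; the proofs are below) =====
def Claim_equal_happyprimelist : Prop := ∀ (n : Int), Dom_happyprimelist n → Spec_happyprimelist n (happyprimelist n)

-- ===== LEMMAS AND PROOFS =====

-- 'x has a nontrivial divisor not exceeding its square root'
def pvHasFac (x : Int) : Prop := ∃ d : Int, 2 ≤ d ∧ d * d ≤ x ∧ d ∣ x

theorem pvFmodPos (x j : Int) (h : 0 < j) : PySem.Int.mod x j = x % j := by
  simp only [PySem.Int.mod]
  rw [Int.fmod_eq_emod, if_pos (Or.inl h.le)]
  ring

theorem pvSqrtBridge (x j : Int) (hx : 0 ≤ x) (hj : 0 ≤ j) : j ≤ Int.sqrt x ↔ j * j ≤ x := by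
  constructor
  · intro h
    have h1 : j.toNat ≤ x.toNat.sqrt := by unfold Int.sqrt at h; omega
    have h3 : (↑(j.toNat * j.toNat) : ℤ) ≤ ↑x.toNat := Nat.cast_le.mpr (Nat.le_sqrt.mp h1)
    rwa [Nat.cast_mul, Int.toNat_of_nonneg hj, Int.toNat_of_nonneg hx] at h3
  · intro h
    have h3 : (↑(j.toNat * j.toNat) : ℤ) ≤ ↑x.toNat := by
      rw [Nat.cast_mul, Int.toNat_of_nonneg hj, Int.toNat_of_nonneg hx]; exact h
    have h2 := Nat.le_sqrt.mpr (Nat.cast_le.mp h3)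
    unfold Int.sqrt
    omega

theorem pvHasFac_iff_not_prime (q : Int) (hq : 2 ≤ q) : pvHasFac q ↔ ¬ Nat.Prime q.toNat := by
  constructor
  · rintro ⟨d, hd2, hsq, hdvd⟩ hp
    have hd0 : (0:Int) ≤ d := by omega
    have hdq : d < q := by nlinarith
    have hdvd' : d.toNat ∣ q.toNat := by
      rwa [← Int.toNat_of_nonneg hd0, ← Int.toNat_of_nonneg (by omega : (0:ℤ) ≤ q),
        Int.natCast_dvd_natCast] at hdvd
    rcases hp.eq_one_or_self_of_dvd _ hdvd' with h1 | h1 <;> omega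
  · intro hp
    have hkp : Nat.Prime q.toNat.minFac := Nat.minFac_prime (by omega)
    have hdvd : ((q.toNat.minFac : ℕ) : ℤ) ∣ q := by
      rw [← Int.toNat_of_nonneg (by omega : (0:ℤ) ≤ q), Int.natCast_dvd_natCast]
      exact Nat.minFac_dvd _
    have hsqN : q.toNat.minFac ^ 2 ≤ q.toNat := Nat.minFac_sq_le_self (by omega) hp
    refine ⟨(q.toNat.minFac : ℤ), by exact_mod_cast hkp.two_le, ?_, hdvd⟩
    have h3 : (↑(q.toNat.minFac * q.toNat.minFac) : ℤ) ≤ ↑q.toNat :=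
      Nat.cast_le.mpr (by nlinarith [hsqN])
    rwa [Nat.cast_mul, Int.toNat_of_nonneg (by omega : (0:ℤ) ≤ q)] at h3

theorem pvHasFac_elim (m : Int) (h2 : 2 ≤ m) (hf : pvHasFac m) :
    ∃ q : Int, 2 ≤ q ∧ q < m ∧ ¬ pvHasFac q ∧ q * q ≤ m ∧ q ∣ m := by
  have hnp : ¬ Nat.Prime m.toNat := (pvHasFac_iff_not_prime m h2).mp hf
  have hkp : Nat.Prime m.toNat.minFac := Nat.minFac_prime (by omega)
  have h2k : (2:ℤ) ≤ (m.toNat.minFac : ℤ) := by exact_mod_cast hkp.two_le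
  have hdvd : ((m.toNat.minFac : ℕ) : ℤ) ∣ m := by
    rw [← Int.toNat_of_nonneg (by omega : (0:ℤ) ≤ m), Int.natCast_dvd_natCast]
    exact Nat.minFac_dvd _
  have hsqN : m.toNat.minFac ^ 2 ≤ m.toNat := Nat.minFac_sq_le_self (by omega) hnp
  have hsq : ((m.toNat.minFac : ℕ) : ℤ) * ((m.toNat.minFac : ℕ) : ℤ) ≤ m := by
    have h3 : (↑(m.toNat.minFac * m.toNat.minFac) : ℤ) ≤ ↑m.toNat :=
      Nat.cast_le.mpr (by nlinarith [hsqN])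
    rwa [Nat.cast_mul, Int.toNat_of_nonneg (by omega : (0:ℤ) ≤ m)] at h3
  have hnf : ¬ pvHasFac ((m.toNat.minFac : ℕ) : ℤ) := by
    rw [pvHasFac_iff_not_prime _ h2k, Int.toNat_natCast, not_not]
    exact hkp
  exact ⟨(m.toNat.minFac : ℤ), h2k, by nlinarith, hnf, hsq, hdvd⟩

theorem pvIsprimeA_eq (x : Int) (hx : 2 ≤ x) : pvIsprimeA x = false ↔ pvHasFac x := by
  unfold pvIsprimeA
  rw [List.all_eq_false]
  constructor
  · rintro ⟨j, hj, hmod⟩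
    rw [PySem.List.mem_pyRange_one] at hj
    have hj2 : 2 ≤ j := hj.1
    have hsq : j * j ≤ x := (pvSqrtBridge x j (by omega) (by omega)).mp (by omega)
    refine ⟨j, hj2, hsq, ?_⟩
    simp only [Bool.not_eq_true, Bool.not_eq_false', beq_iff_eq] at hmod
    rw [pvFmodPos x j (by omega)] at hmod
    exact Int.dvd_of_emod_eq_zero hmod
  · rintro ⟨d, hd2, hsq, hdvd⟩
    refine ⟨d, ?_, ?_⟩
    · rw [PySem.List.mem_pyRange_one]
      have := (pvSqrtBridge x d (by omega) (by omega)).mpr hsq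
      omega
    · simp only [Bool.not_eq_true, Bool.not_eq_false', beq_iff_eq]
      rw [pvFmodPos x d (by omega)]
      exact Int.emod_eq_zero_of_dvd hdvd

-- 'm is a multiple, with square-factor witness q < p, of a factorless q, inside [4, n)'
def pvMarked (n p m : Int) : Prop :=
  m < n ∧ ∃ q : Int, 2 ≤ q ∧ q < p ∧ ¬ pvHasFac q ∧ q * q ≤ m ∧ q ∣ m

theorem pvMarkFold_size (l : List Int) (A : Array Bool) :
    (l.foldl (fun a m => a.setIfInBounds m.toNat true) A).size = A.size := by
  induction l generalizing A with
  | nil => rfl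
  | cons m l ih => rw [List.foldl_cons, ih, Array.size_setIfInBounds]

theorem pvMarkFold_getD (l : List Int) (A : Array Bool) (k : Nat) (hk : k < A.size)
    (hl : ∀ m ∈ l, 0 ≤ m ∧ m.toNat < A.size) :
    ((l.foldl (fun a m => a.setIfInBounds m.toNat true) A).getD k false = true
      ↔ (A.getD k false = true ∨ ∃ m ∈ l, m.toNat = k)) := by
  induction l generalizing A with
  | nil => simp
  | cons m l ih =>
    rw [List.foldl_cons]
    have hm := hl m (by simp)
    rw [ih _ (by rwa [Array.size_setIfInBounds])
      (by intro x hx; simpa [Array.size_setIfInBounds] using hl x (by simp [hx]))]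
    by_cases hmk : m.toNat = k
    · simp only [Array.getD_eq_getD_getElem?, Array.getElem?_setIfInBounds, hmk, if_pos rfl,
        if_pos hk, Option.getD_some]
      constructor
      · intro _; right; exact ⟨m, by simp, hmk⟩
      · intro _; left; rfl
    · simp only [Array.getD_eq_getD_getElem?, Array.getElem?_setIfInBounds, if_neg hmk]
      constructor
      · rintro (h | ⟨x, hx, hxk⟩)
        · exact Or.inl h
        · exact Or.inr ⟨x, by simp [hx], hxk⟩
      · rintro (h | ⟨x, hx, hxk⟩)
        · exact Or.inl h
        · rcases List.mem_cons.mp hx with rfl | hx'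
          · exact absurd hxk hmk
          · exact Or.inr ⟨x, hx', hxk⟩

theorem pvMarked_step (n p : Int) (hp : 2 ≤ p) (hpn : p * p < n) (comp : Array Bool)
    (hsize : comp.size = n.toNat)
    (hinv : ∀ m : Int, 0 ≤ m → m < n → (comp.getD m.toNat false = true ↔ pvMarked n p m)) :
    ∀ m : Int, 0 ≤ m → m < n →
      ((if !(comp.getD p.toNat false) then
          (PySem.List.pyRange (p * p) n p).foldl (fun a m => a.setIfInBounds m.toNat true) comp
        else comp).getD m.toNat false = true ↔ pvMarked n (p + 1) m) := by
  have hpn' : p < n := by nlinarith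
  have hpp0 : (0:Int) ≤ p * p := mul_self_nonneg p
  by_cases hcp : comp.getD p.toNat false = true
  · rw [hcp]
    have hfp : pvHasFac p := by
      obtain ⟨-, q, hq2, hqlt, -, hqsq, hqd⟩ := (hinv p (by omega) hpn').mp hcp
      exact ⟨q, hq2, hqsq, hqd⟩
    intro m hm0 hmn
    simp only [Bool.not_true, Bool.false_eq_true, if_false]
    rw [hinv m hm0 hmn]
    unfold pvMarked
    constructor
    · rintro ⟨hmn', q, hq2, hqlt, hnf, hsq, hdvd⟩
      exact ⟨hmn', q, hq2, by omega, hnf, hsq, hdvd⟩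
    · rintro ⟨hmn', q, hq2, hqlt, hnf, hsq, hdvd⟩
      refine ⟨hmn', q, hq2, ?_, hnf, hsq, hdvd⟩
      by_cases hqp : q = p
      · exact absurd hfp (hqp ▸ hnf)
      · omega
  · have hcp' : comp.getD p.toNat false = false := by
      rcases hcc : comp.getD p.toNat false with _ | _
      · rfl
      · exact absurd hcc hcp
    have hnfp : ¬ pvHasFac p := by
      intro hf
      obtain ⟨q, hq2, hqlt, hnf, hsq, hdvd⟩ := pvHasFac_elim p hp hf
      exact hcp ((hinv p (by omega) hpn').mpr ⟨hpn', q, hq2, hqlt, hnf, hsq, hdvd⟩)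
    intro m hm0 hmn
    rw [hcp']
    simp only [Bool.not_false, if_pos]
    rw [pvMarkFold_getD _ _ _ (by omega)
      (by
        intro x hx
        rw [PySem.List.mem_pyRange_iff_of_pos (by omega)] at hx
        constructor
        · omega
        · omega)]
    rw [hinv m hm0 hmn]
    unfold pvMarked
    constructor
    · rintro (⟨hmn', q, hq2, hqlt, hnf, hsq, hdvd⟩ | ⟨x, hx, hxk⟩)
      · exact ⟨hmn', q, hq2, by omega, hnf, hsq, hdvd⟩
      · rw [PySem.List.mem_pyRange_iff_of_pos (by omega)] at hx
        have hxm : x = m := by omega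
        subst hxm
        refine ⟨hx.2.1, p, hp, by omega, hnfp, hx.1, ?_⟩
        have h1 : p ∣ x - p * p + p * p := dvd_add hx.2.2 (dvd_mul_left p p)
        simpa using h1
    · rintro ⟨hmn', q, hq2, hqlt, hnf, hsq, hdvd⟩
      by_cases hqp : q = p
      · subst hqp
        refine Or.inr ⟨m, ?_, rfl⟩
        rw [PySem.List.mem_pyRange_iff_of_pos (by omega)]
        exact ⟨hsq, hmn', dvd_sub hdvd (dvd_mul_left q q)⟩
      · exact Or.inl ⟨hmn', q, hq2, by omega, hnf, hsq, hdvd⟩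

theorem pvSieve_inv (n p : Int) (comp : Array Bool) :
    2 ≤ p → comp.size = n.toNat →
    (∀ m : Int, 0 ≤ m → m < n → (comp.getD m.toNat false = true ↔ pvMarked n p m)) →
    ∀ m : Int, 0 ≤ m → m < n →
      ((pvSieveLoopB n p comp).getD m.toNat false = true ↔
        (m < n ∧ ∃ q : Int, 2 ≤ q ∧ ¬ pvHasFac q ∧ q * q ≤ m ∧ q ∣ m)) := by
  fun_induction pvSieveLoopB n p comp with
  | case1 p comp h ih =>
    intro hp hsize hinv m hm0 hmn
    refine ih (by omega) ?_ (pvMarked_step n p hp h comp hsize hinv) m hm0 hmn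
    split
    · rw [pvMarkFold_size, hsize]
    · exact hsize
  | case2 p comp h =>
    intro hp hsize hinv m hm0 hmn
    rw [hinv m hm0 hmn]
    unfold pvMarked
    constructor
    · rintro ⟨hmn', q, hq2, hqlt, hnf, hsq, hdvd⟩
      exact ⟨hmn', q, hq2, hnf, hsq, hdvd⟩
    · rintro ⟨hmn', q, hq2, hnf, hsq, hdvd⟩
      refine ⟨hmn', q, hq2, ?_, hnf, hsq, hdvd⟩
      nlinarith

-- membership in the final sieve array
theorem pvSieve_char (n m : Int) (hm0 : 0 ≤ m) (hmn : m < n) :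
    ((pvSieveLoopB n 2 (Array.replicate n.toNat false)).getD m.toNat false = true) ↔
      (2 ≤ m ∧ pvHasFac m) := by
  rw [pvSieve_inv n 2 (Array.replicate n.toNat false) (by omega) Array.size_replicate
    (by
      intro m hm0 hmn
      simp only [Array.getD_eq_getD_getElem?, Array.getElem?_replicate]
      unfold pvMarked
      constructor
      · intro h
        exfalso
        by_cases hlt : m.toNat < n.toNat <;> simp [hlt] at h
      · rintro ⟨-, q, hq2, hqlt, -⟩
        omega) m hm0 hmn]
  constructor
  · rintro ⟨hmn', q, hq2, hnf, hsq, hdvd⟩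
    exact ⟨by nlinarith, q, hq2, hsq, hdvd⟩
  · rintro ⟨h2, hf⟩
    obtain ⟨q, hq2, hqlt, hnf, hsq, hdvd⟩ := pvHasFac_elim m h2 hf
    exact ⟨hmn, q, hq2, hnf, hsq, hdvd⟩

theorem pvSsdIterB_eq (s x : Int) : pvSsdIterB s x = s + pvSsd x := by
  fun_induction pvSsdIterB s x with
  | case1 s => rw [pvSsd]; simp
  | case2 s x h1 h2 => rw [pvSsd, if_neg h1, if_pos h2]; simp
  | case3 s x h1 h2 ih =>
    rw [ih]
    conv_rhs => rw [pvSsd]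
    rw [if_neg h1, if_neg h2]
    ring

theorem pvIshappy_eq (fuel : Nat) (memo : List Int) (seen : PySem.Set Int) (x : Int)
    (h : ∀ v : Int, v ∈ memo ↔ v ∈ seen) :
    pvIshappyHelperA fuel memo x = pvIshappyLoopB fuel seen x := by
  induction fuel generalizing memo seen x with
  | zero => rfl
  | succ f ih =>
    rw [pvIshappyHelperA, pvIshappyLoopB]
    by_cases h1 : x = 1
    · simp [h1]
    · rw [if_neg h1, if_neg h1]
      by_cases h2 : x ∈ memo
      · rw [if_pos h2, if_pos ((PySem.Set.contains_iff _ _).mpr ((h x).mp h2))]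
      · have hc : PySem.Set.contains seen x = false := by
          rcases hcc : PySem.Set.contains seen x with _ | _
          · rfl
          · exact absurd ((h x).mpr ((PySem.Set.contains_iff _ _).mp hcc)) h2
        rw [if_neg h2, hc, if_neg (by simp)]
        rw [pvSsdIterB_eq, zero_add]
        apply ih
        intro v
        rw [List.mem_append, List.mem_singleton, PySem.Set.mem_add, h v]

theorem pvHappyLoopA_eq_foldl (n i : Int) (lst : List Int) :
    pvHappyLoopA n i lst = (PySem.List.pyRange i n 1).foldl
      (fun out j => if pvIsprimeA j && pvIshappyA j then out ++ [j] else out) lst := by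
  fun_induction pvHappyLoopA n i lst with
  | case1 i lst h ih =>
    rw [PySem.List.pyRange_one_cons h, List.foldl_cons]
    simp only [dite_eq_ite] at ih
    exact ih
  | case2 i lst h =>
    rw [PySem.List.pyRange_one_eq_nil (by omega), List.foldl_nil]

-- ===== VERDICT (by name: the statement is the Claim_ definition above) =====
theorem happyprimelist_spec : Claim_equal_happyprimelist := by
  intro n _
  unfold Spec_happyprimelist happyprimelist happyprimelist_alt
  rw [pvHappyLoopA_eq_foldl]
  apply PySem.List.foldl_congr_mem
  intro acc x hx
  rw [PySem.List.mem_pyRange_one] at hx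
  have h1 : pvIsprimeA x =
      !((pvSieveLoopB n 2 (Array.replicate n.toNat false)).getD x.toNat false) := by
    rcases hg : (pvSieveLoopB n 2 (Array.replicate n.toNat false)).getD x.toNat false with _ | _
    · have hnf : ¬ pvHasFac x := fun hf =>
        absurd ((pvSieve_char n x (by omega) hx.2).mpr ⟨hx.1, hf⟩) (by rw [hg]; simp)
      have : pvIsprimeA x = true := by
        rcases hpr : pvIsprimeA x with _ | _
        · exact absurd ((pvIsprimeA_eq x hx.1).mp hpr) hnf
        · rfl
      rw [this]
      rfl
    · have hf : pvHasFac x := ((pvSieve_char n x (by omega) hx.2).mp hg).2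
      rw [(pvIsprimeA_eq x hx.1).mpr hf]
      rfl
  have h2 : pvIshappyA x = pvIshappyB x := by
    unfold pvIshappyA pvIshappyB
    exact pvIshappy_eq 1000 [] PySem.Set.empty x (by simp [PySem.Set.empty])
  rw [h1, h2]
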